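-- pv_equiv track=rewrite | github.com/naibu3/codigos_y_cripto | practica4/rsa.py | preparetextdecipher
-- ===== SOURCE A (Python) =====
-- def preparetextdecipher(nums):
--     """
--     Toma un vector numerico, y devuelva una cadena numérica lista para ser traducida a texto.
--
--     Args:
--         nums: Cadena a traducir.
--
--     Returns:
--         Devuelve un texto.
--     """
--     # Une todos los bloques en una sola cadena
--     text = ''.join(str(num) for num in nums)
--
--     # Elimina los posibles caracteres de relleno (0 y 30 al final)
--     while text.endswith("30") or text.endswith("0"):
--         if text.endswith("30"):
--             text = text[:-2]
--         elif text.endswith("0"):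
--             text = text[:-1]
--
--     return text
-- ===== SOURCE B (Python) =====
-- def preparetextdecipher(nums):
--     text = ''.join(str(num) for num in nums)
--     # Single left-to-right scan: find the earliest position `cut` from which the
--     # rest of the string is a concatenation of the padding tokens '0' and '30';
--     # everything before that position is the answer.
--     n = len(text)
--     cut = 0
--     i = 0
--     while i < n:
--         if text[i] == '0':
--             i += 1
--         elif text[i] == '3' and i + 1 < n and text[i + 1] == '0':
--             i += 2
--         else:
--             i += 1
--             cut = i
--     return text[:cut]
-- ===== Notes on version B (the rewrite author's own statement) =====
-- stated objective: alternative
-- what changed: Replaces the repeated right-end stripping loop (endswith + slicing, re-copying the string on every removed token) with a single left-to-right scan that computes the earliest cut position from which the suffix is tileable by the padding tokens '0'/'30', then takes one prefix.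
import Mathlib
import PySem

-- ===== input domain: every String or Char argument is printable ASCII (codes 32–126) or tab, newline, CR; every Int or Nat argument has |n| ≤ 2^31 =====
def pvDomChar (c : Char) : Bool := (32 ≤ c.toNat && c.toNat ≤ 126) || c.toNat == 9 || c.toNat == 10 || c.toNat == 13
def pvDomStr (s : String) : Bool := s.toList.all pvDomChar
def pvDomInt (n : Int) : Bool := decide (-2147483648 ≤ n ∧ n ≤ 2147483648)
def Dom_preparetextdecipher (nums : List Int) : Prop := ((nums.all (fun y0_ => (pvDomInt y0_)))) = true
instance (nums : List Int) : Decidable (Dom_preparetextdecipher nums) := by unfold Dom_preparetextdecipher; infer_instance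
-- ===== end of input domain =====

-- B replaces A's repeated right-end stripping (endswith + slicing) by one forward scan
-- computing the cut position; identical return value, alternative single-pass structure.

-- ===== PORT A =====
-- while text.endswith("30") or text.endswith("0"): strip 2 resp. 1 from the end
def stripA (cs : List Char) : List Char :=
  if PySem.Chars.endswith cs ['3', '0'] then
    stripA cs.dropLast.dropLast
  else if PySem.Chars.endswith cs ['0'] then
    stripA cs.dropLast
  else cs
termination_by cs.length
decreasing_by
  · have h : cs ≠ [] := by
      rintro rfl; simp [PySem.Chars.endswith] at *
    have hp : 0 < cs.length := List.length_pos_iff.mpr h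
    simp only [List.length_dropLast]
    omega
  · have h : cs ≠ [] := by
      rintro rfl; simp [PySem.Chars.endswith] at *
    cases cs with
    | nil => exact absurd rfl h
    | cons a t => simp [List.length_dropLast]

def preparetextdecipher (nums : List Int) : String :=
  -- text = ''.join(str(num) for num in nums), then the stripping loop
  String.ofList (stripA (nums.flatMap (fun n => PySem.Int.toChars n)))

-- ===== PORT B =====
-- the forward scan of Source B: i walks the string, cut records the position after the last failure
def scanB : List Char → Nat → Nat → Nat
  | [], _, cut => cut
  | '0' :: t, i, cut => scanB t (i + 1) cut
  | '3' :: '0' :: t, i, cut => scanB t (i + 2) cut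
  | _ :: t, i, _ => scanB t (i + 1) (i + 1)

def preparetextdecipher_alt (nums : List Int) : String :=
  let text := nums.flatMap (fun n => PySem.Int.toChars n)
  String.ofList (text.take (scanB text 0 0))

-- ===== PRECONDITION & SPEC =====
def Spec_preparetextdecipher (nums : List Int) (out : String) : Prop := out = preparetextdecipher_alt nums
instance (nums : List Int) (out : String) : Decidable (Spec_preparetextdecipher nums out) := by unfold Spec_preparetextdecipher; infer_instance

-- ===== CLAIM (what is proved, stated in full; the proofs are below) =====
def Claim_equal_preparetextdecipher : Prop := ∀ (nums : List Int), Dom_preparetextdecipher nums → Spec_preparetextdecipher nums (preparetextdecipher nums)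

-- ===== LEMMAS AND PROOFS =====

-- the catch-all step of the scan, as an unconditional rewrite
theorem scanB_catchall (c : Char) (t : List Char) (i cut : Nat) (h1 : c ≠ '0')
    (h2 : ∀ t', c = '3' → t = '0' :: t' → False) :
    scanB (c :: t) i cut = scanB t (i + 1) (i + 1) := by
  rw [scanB.eq_def]
  split
  · simp_all
  · simp_all
  · rename_i ts heq
    injection heq with hc ht
    exact (h2 ts hc ht).elim
  · rename_i hh heq
    injection heq with hc ht
    rw [ht]

-- the cut never exceeds the end of the string
theorem scanB_le : ∀ (cs : List Char) (i cut : Nat), cut ≤ i → scanB cs i cut ≤ i + cs.length := by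
  intro cs i cut
  induction cs, i, cut using scanB.induct with
  | case1 => intro h; simp [scanB]; omega
  | case2 t i cut ih => intro h; simp only [scanB]; have := ih (by omega); simp; omega
  | case3 t i cut ih => intro h; simp only [scanB]; have := ih (by omega); simp; omega
  | case4 c t i cut h1 h2 ih =>
      intro _
      rw [scanB_catchall c t i cut (fun hc => h1 hc) h2]
      have := ih (le_refl _)
      simp; omega

-- if the string does not end in '0', the scan fails at (or after) the last character: cut = end
theorem scanB_no_zero : ∀ (cs : List Char) (i cut : Nat), cs ≠ [] → cs.getLast? ≠ some '0' →
    scanB cs i cut = i + cs.length := by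
  intro cs i cut
  induction cs, i, cut using scanB.induct with
  | case1 => intro h _; exact absurd rfl h
  | case2 t i cut ih =>
      intro _ hlast
      cases t with
      | nil => simp at hlast
      | cons a t' =>
          simp only [scanB]
          rw [ih (by simp) (by simpa [List.getLast?_cons_cons] using hlast)]
          simp; omega
  | case3 t i cut ih =>
      intro _ hlast
      cases t with
      | nil => simp at hlast
      | cons a t' =>
          simp only [scanB]
          rw [ih (by simp) (by simpa [List.getLast?_cons_cons] using hlast)]
          simp; omega
  | case4 c t i cut h1 h2 ih =>
      intro _ hlast
      rw [scanB_catchall c t i cut (fun hc => h1 hc) h2]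
      cases t with
      | nil => simp [scanB]
      | cons a t' =>
          rw [ih (by simp) (by simpa [List.getLast?_cons_cons] using hlast)]
          simp; omega

-- appending a whole '30' token never changes the cut
theorem scanB_append30 : ∀ (cs : List Char) (i cut : Nat),
    scanB (cs ++ ['3', '0']) i cut = scanB cs i cut := by
  intro cs i cut
  induction cs, i, cut using scanB.induct with
  | case1 => simp [scanB]
  | case2 t i cut ih => simpa only [List.cons_append, scanB] using ih
  | case3 t i cut ih => simpa only [List.cons_append, scanB] using ih
  | case4 c t i cut h1 h2 ih =>
      have h2' : ∀ t', c = '3' → t ++ ['3', '0'] = '0' :: t' → False := by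
        intro t' hc ht
        cases t with
        | nil => simp at ht
        | cons a t'' =>
            simp only [List.cons_append, List.cons.injEq] at ht
            exact h2 t'' hc (by rw [ht.1])
      rw [List.cons_append, scanB_catchall c _ i cut (fun hc => h1 hc) h2',
          scanB_catchall c t i cut (fun hc => h1 hc) h2, ih]

-- appending a '0' token changes nothing unless it completes a '30' token
theorem scanB_append0 : ∀ (cs : List Char) (i cut : Nat), cs.getLast? ≠ some '3' →
    scanB (cs ++ ['0']) i cut = scanB cs i cut := by
  intro cs i cut
  induction cs, i, cut using scanB.induct with
  | case1 => intro _; simp [scanB]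
  | case2 t i cut ih =>
      intro hlast
      cases t with
      | nil => simp [scanB]
      | cons a t' =>
          simp only [List.cons_append, scanB]
          exact ih (by simpa [List.getLast?_cons_cons] using hlast)
  | case3 t i cut ih =>
      intro hlast
      cases t with
      | nil => simp [scanB]
      | cons a t' =>
          simp only [List.cons_append, scanB]
          exact ih (by simpa [List.getLast?_cons_cons] using hlast)
  | case4 c t i cut h1 h2 ih =>
      intro hlast
      cases t with
      | nil =>
          have hc3 : c ≠ '3' := by simpa using hlast
          rw [List.cons_append, List.nil_append,
              scanB_catchall c ['0'] i cut (fun hc => h1 hc) (fun t' hc _ => hc3 hc),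
              scanB_catchall c [] i cut (fun hc => h1 hc) h2]
          simp [scanB]
      | cons a t' =>
          have h2' : ∀ u, c = '3' → (a :: t') ++ ['0'] = '0' :: u → False := by
            intro u hc ht
            simp only [List.cons_append, List.cons.injEq] at ht
            exact h2 t' hc (by rw [ht.1])
          rw [List.cons_append, scanB_catchall c _ i cut (fun hc => h1 hc) h2',
              scanB_catchall c (a :: t') i cut (fun hc => h1 hc) h2]
          exact ih (by simpa [List.getLast?_cons_cons] using hlast)

theorem stripA_eq_take_scanB : ∀ (cs : List Char), stripA cs = cs.take (scanB cs 0 0) := by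
  intro cs
  induction cs using stripA.induct with
  | case1 cs h30 ih =>
      rw [PySem.Chars.endswith_iff] at h30
      obtain ⟨l, rfl⟩ := h30
      have hdrop : (l ++ ['3', '0']).dropLast.dropLast = l := by
        have h : l ++ ['3', '0'] = (l ++ ['3']) ++ ['0'] := by simp
        rw [h, List.dropLast_concat, List.dropLast_concat]
      rw [hdrop] at ih
      rw [stripA, if_pos (by rw [PySem.Chars.endswith_iff]; exact ⟨l, rfl⟩), hdrop, ih,
          scanB_append30, List.take_append_of_le_length (by simpa using scanB_le l 0 0 (le_refl 0))]
  | case2 cs h30 h0 ih =>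
      rw [PySem.Chars.endswith_iff] at h0
      obtain ⟨l, rfl⟩ := h0
      rw [List.dropLast_concat] at ih
      have hlast : l.getLast? ≠ some '3' := by
        intro hl
        obtain ⟨l', rfl⟩ := List.getLast?_eq_some_iff.mp hl
        exact h30 (by rw [PySem.Chars.endswith_iff]; exact ⟨l', by simp⟩)
      rw [stripA, if_neg h30, if_pos (by rw [PySem.Chars.endswith_iff]; exact ⟨l, rfl⟩),
          List.dropLast_concat, ih, scanB_append0 l 0 0 hlast,
          List.take_append_of_le_length (by simpa using scanB_le l 0 0 (le_refl 0))]
  | case3 cs h30 h0 =>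
      rcases List.eq_nil_or_concat cs with rfl | ⟨l, a, rfl⟩
      · rw [stripA, if_neg (by simp [PySem.Chars.endswith_iff]),
            if_neg (by simp [PySem.Chars.endswith_iff])]
        simp [scanB]
      · rw [List.concat_eq_append] at h30 h0 ⊢
        have hlast : (l ++ [a]).getLast? ≠ some '0' := by
          intro hl
          simp only [List.getLast?_concat, Option.some.injEq] at hl
          exact h0 (by rw [PySem.Chars.endswith_iff]; exact ⟨l, by rw [hl]⟩)
        rw [stripA, if_neg h30, if_neg h0, scanB_no_zero _ 0 0 (by simp) hlast]
        simp

-- ===== VERDICT (by name: the statement is the Claim_ definition above) =====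
theorem preparetextdecipher_spec : Claim_equal_preparetextdecipher := by
  intro nums _
  unfold Spec_preparetextdecipher preparetextdecipher preparetextdecipher_alt
  simp [stripA_eq_take_scanB]
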